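-- pv_equiv track=rewrite | github.com/33671/fagent | fagent/utils.py | strip_past_turn_reasoning_context
-- ===== SOURCE A (Python) =====
-- from typing import List, Dict
--
-- def strip_past_turn_reasoning_context(messages: List[Dict], preserve_thinking: bool = False) -> List[Dict]:
--     """保留最后一个 user 消息之后的 reasoning_content（根据配置）"""
--     if not messages:
--         return []
--     if preserve_thinking:
--         return [msg.copy() for msg in messages]
--
--     last_user_index = -1
--     for i, msg in enumerate(messages):
--         if isinstance(msg, dict) and msg.get("role") == "user":
--             last_user_index = i
--
--     filtered = []
--     for idx, msg in enumerate(messages):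
--         msg_copy = msg.copy()
--         if idx <= last_user_index:
--             msg_copy.pop("reasoning_content", None)
--         filtered.append(msg_copy)
--     return filtered
-- ===== SOURCE B (Python) =====
-- from typing import List, Dict
--
-- def strip_past_turn_reasoning_context(messages: List[Dict], preserve_thinking: bool = False) -> List[Dict]:
--     """Single reverse pass: strip reasoning_content from the last user message and everything before it."""
--     if not messages:
--         return []
--     if preserve_thinking:
--         return [msg.copy() for msg in messages]
--
--     out = []
--     reached_last_user = False
--     for msg in reversed(messages):
--         msg_copy = msg.copy()
--         if reached_last_user or (isinstance(msg, dict) and msg.get("role") == "user"):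
--             reached_last_user = True
--             msg_copy.pop("reasoning_content", None)
--         out.append(msg_copy)
--     out.reverse()
--     return out
-- ===== Notes on version B (the rewrite author's own statement) =====
-- stated objective: simpler
-- what changed: Replaced the two-pass algorithm (one enumerate pass to find the last user index, a second indexed pass to strip) with a single reverse traversal carrying a reached-last-user flag, stripping while the flag is set and reversing the output once.
import Mathlib
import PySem

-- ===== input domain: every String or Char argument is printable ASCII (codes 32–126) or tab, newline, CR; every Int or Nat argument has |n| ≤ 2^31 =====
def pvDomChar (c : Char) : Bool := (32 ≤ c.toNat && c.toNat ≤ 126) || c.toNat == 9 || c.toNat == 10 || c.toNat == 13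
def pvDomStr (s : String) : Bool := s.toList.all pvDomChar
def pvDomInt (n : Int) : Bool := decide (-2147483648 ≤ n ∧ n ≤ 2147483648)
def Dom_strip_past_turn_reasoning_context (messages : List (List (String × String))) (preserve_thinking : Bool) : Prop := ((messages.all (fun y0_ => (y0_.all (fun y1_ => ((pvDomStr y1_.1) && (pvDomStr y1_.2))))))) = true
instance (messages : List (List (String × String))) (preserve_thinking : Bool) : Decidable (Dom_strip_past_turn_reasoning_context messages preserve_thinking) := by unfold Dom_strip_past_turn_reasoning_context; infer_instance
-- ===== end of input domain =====

-- B replaces A's two passes (find the last-user index by enumerate, then strip by index comparison)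
-- with one reverse traversal carrying a reached-last-user flag; objective: simpler (no speed claim).

-- ===== PORT A =====
-- literal port of A: find the last index whose "role" is "user", then copy each message,
-- popping "reasoning_content" from every message at an index ≤ that last index.
-- (dicts are association lists; msg.get("k") / msg.pop("k", None) go through PySem.Dict on the wrapped list)
def strip_past_turn_reasoning_context (messages : List (List (String × String))) (preserve_thinking : Bool) : List (List (String × String)) :=
  if messages = [] then []
  else if preserve_thinking then messages.map (fun msg => msg)
  else
    let last_user_index : Int :=
      (PySem.List.enumerate messages 0).foldl
        (fun acc p => if (PySem.Dict.mk p.2).get? "role" == some "user" then p.1 else acc) (-1)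
    (PySem.List.enumerate messages 0).foldl
      (fun acc p =>
        acc ++ [if p.1 ≤ last_user_index then ((PySem.Dict.mk p.2).erase "reasoning_content").items else p.2]) []

-- ===== PORT B =====
-- literal port of B: fold over the reversed list with a (reached_last_user, out) state, reverse at the end
def strip_past_turn_reasoning_context_alt (messages : List (List (String × String))) (preserve_thinking : Bool) : List (List (String × String)) :=
  if messages = [] then []
  else if preserve_thinking then messages.map (fun msg => msg)
  else
    let st :=
      messages.reverse.foldl
        (fun (st : Bool × List (List (String × String))) msg =>
          if st.1 || ((PySem.Dict.mk msg).get? "role" == some "user") then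
            (true, st.2 ++ [((PySem.Dict.mk msg).erase "reasoning_content").items])
          else
            (st.1, st.2 ++ [msg]))
        (false, [])
    st.2.reverse

-- ===== PRECONDITION & SPEC =====
def Spec_strip_past_turn_reasoning_context (messages : List (List (String × String))) (preserve_thinking : Bool) (out : List (List (String × String))) : Prop := out = strip_past_turn_reasoning_context_alt messages preserve_thinking
instance (messages : List (List (String × String))) (preserve_thinking : Bool) (out : List (List (String × String))) : Decidable (Spec_strip_past_turn_reasoning_context messages preserve_thinking out) := by unfold Spec_strip_past_turn_reasoning_context; infer_instance

-- ===== CLAIM (what is proved, stated in full; the proofs are below) =====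
def Claim_equal_strip_past_turn_reasoning_context : Prop := ∀ (messages : List (List (String × String))) (preserve_thinking : Bool), Dom_strip_past_turn_reasoning_context messages preserve_thinking → Spec_strip_past_turn_reasoning_context messages preserve_thinking (strip_past_turn_reasoning_context messages preserve_thinking)

-- ===== LEMMAS AND PROOFS =====

-- "this message's role is user"
def pvIsUser (m : List (String × String)) : Bool := (PySem.Dict.mk m).get? "role" == some "user"

-- "some message in l has role user"
def pvHasUser (l : List (List (String × String))) : Bool := l.any pvIsUser

-- reference function: strip a message iff its suffix (itself included) contains a user message
def pvGo : List (List (String × String)) → List (List (String × String))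
  | [] => []
  | m :: rest =>
      (if pvIsUser m || pvHasUser rest then ((PySem.Dict.mk m).erase "reasoning_content").items else m) :: pvGo rest

-- A's last-user-index fold, generalized over the enumerate start and the accumulator
def pvF (s acc : Int) (l : List (List (String × String))) : Int :=
  (PySem.List.enumerate l s).foldl
    (fun acc p => if (PySem.Dict.mk p.2).get? "role" == some "user" then p.1 else acc) acc

lemma pvF_nil (s acc : Int) : pvF s acc [] = acc := rfl

lemma pvF_cons (s acc : Int) (m : List (String × String)) (rest : List (List (String × String))) :
    pvF s acc (m :: rest) = pvF (s + 1) (if pvIsUser m then s else acc) rest := by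
  simp [pvF, PySem.List.enumerate_cons, pvIsUser]

lemma pvHasUser_cons (m : List (String × String)) (rest : List (List (String × String))) :
    pvHasUser (m :: rest) = (pvIsUser m || pvHasUser rest) := by
  simp [pvHasUser, List.any_cons]

lemma pvF_mono (l : List (List (String × String))) : ∀ s acc : Int, acc ≤ s → acc ≤ pvF s acc l := by
  induction l with
  | nil => intro s acc h; rw [pvF_nil]
  | cons m rest ih =>
      intro s acc h
      rw [pvF_cons]
      by_cases hu : pvIsUser m = true
      · rw [if_pos hu]
        exact le_trans h (ih (s + 1) s (by omega))
      · rw [if_neg hu]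
        exact ih (s + 1) acc (by omega)

lemma pvF_no_user (l : List (List (String × String))) (hl : pvHasUser l = false) :
    ∀ s acc : Int, pvF s acc l = acc := by
  induction l with
  | nil => intro s acc; exact pvF_nil s acc
  | cons m rest ih =>
      intro s acc
      rw [pvHasUser_cons, Bool.or_eq_false_iff] at hl
      rw [pvF_cons, if_neg (by simp [hl.1])]
      exact ih hl.2 (s + 1) acc

lemma pvF_user (l : List (List (String × String))) (hl : pvHasUser l = true) :
    ∀ s acc : Int, s ≤ pvF s acc l := by
  induction l with
  | nil => intro s acc; simp [pvHasUser] at hl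
  | cons m rest ih =>
      intro s acc
      rw [pvHasUser_cons, Bool.or_eq_true_iff] at hl
      rw [pvF_cons]
      by_cases hu : pvIsUser m = true
      · rw [if_pos hu]
        exact pvF_mono rest (s + 1) s (by omega)
      · rw [if_neg hu]
        have hr : pvHasUser rest = true := by
          rcases hl with h | h
          · exact absurd h hu
          · exact h
        have := ih hr (s + 1) acc
        omega

-- main A-side lemma: the strip-by-index map equals the suffix-based reference
lemma pvA_key (l : List (List (String × String))) :
    ∀ s acc : Int, acc < s →
      (PySem.List.enumerate l s).map
          (fun p => if p.1 ≤ pvF s acc l then ((PySem.Dict.mk p.2).erase "reasoning_content").items else p.2)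
        = pvGo l := by
  induction l with
  | nil => intro s acc _; rfl
  | cons m rest ih =>
      intro s acc hlt
      rw [PySem.List.enumerate_cons, List.map_cons, pvF_cons, pvGo]
      have hacc'lt : (if pvIsUser m then s else acc) < s + 1 := by
        by_cases hu : pvIsUser m = true <;> simp [hu] <;> omega
      congr 1
      · -- head element
        by_cases hu : pvIsUser m = true
        · have hs : s ≤ pvF (s + 1) (if pvIsUser m then s else acc) rest := by
            rw [if_pos hu]; exact pvF_mono rest (s + 1) s (by omega)
          rw [if_pos hs]; simp [hu]
        · by_cases hr : pvHasUser rest = true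
          · have hs : s ≤ pvF (s + 1) (if pvIsUser m then s else acc) rest :=
              le_trans (by omega) (pvF_user rest hr (s + 1) _)
            rw [if_pos hs]; simp [hu, hr]
          · have hr' : pvHasUser rest = false := by simpa using hr
            have heq : pvF (s + 1) (if pvIsUser m then s else acc) rest = acc := by
              rw [pvF_no_user rest hr', if_neg hu]
            have hs : ¬ (s ≤ pvF (s + 1) (if pvIsUser m then s else acc) rest) := by omega
            rw [if_neg hs]; simp [hu, hr']
      · -- tail: same threshold value, shifted start
        exact ih (s + 1) (if pvIsUser m then s else acc) hacc'lt

-- B-side lemma: the reverse fold computes (pvHasUser l, (pvGo l).reverse)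
lemma pvB_key (l : List (List (String × String))) :
    l.reverse.foldl
      (fun (st : Bool × List (List (String × String))) msg =>
        if st.1 || ((PySem.Dict.mk msg).get? "role" == some "user") then
          (true, st.2 ++ [((PySem.Dict.mk msg).erase "reasoning_content").items])
        else
          (st.1, st.2 ++ [msg]))
      (false, [])
    = (pvHasUser l, (pvGo l).reverse) := by
  induction l with
  | nil => simp [pvHasUser, pvGo]
  | cons m rest ih =>
      rw [List.reverse_cons, List.foldl_append, ih]
      simp only [List.foldl_cons, List.foldl_nil, pvGo, List.reverse_cons, pvHasUser_cons]
      by_cases hr : pvHasUser rest = true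
      · simp [hr, pvIsUser]
      · have hr' : pvHasUser rest = false := by simpa using hr
        by_cases hu : pvIsUser m = true
        · have : (PySem.Dict.mk m).get? "role" == some "user" := hu
          simp [hr', hu, this]
        · have : ((PySem.Dict.mk m).get? "role" == some "user") = false := by simpa [pvIsUser] using hu
          simp [hr', hu, this]

lemma pvA_eq_go (l : List (List (String × String))) (hne : l ≠ []) :
    strip_past_turn_reasoning_context l false = pvGo l := by
  unfold strip_past_turn_reasoning_context
  rw [if_neg hne]
  simp only [Bool.false_eq_true, if_false]
  rw [PySem.List.foldl_append_singleton_eq_map]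
  simpa [pvF] using pvA_key l 0 (-1) (by omega)

lemma pvB_eq_go (l : List (List (String × String))) (hne : l ≠ []) :
    strip_past_turn_reasoning_context_alt l false = pvGo l := by
  unfold strip_past_turn_reasoning_context_alt
  rw [if_neg hne]
  simp only [Bool.false_eq_true, if_false]
  rw [pvB_key l]
  simp

-- ===== VERDICT (by name: the statement is the Claim_ definition above) =====
theorem strip_past_turn_reasoning_context_spec : Claim_equal_strip_past_turn_reasoning_context := by
  intro messages preserve_thinking _
  unfold Spec_strip_past_turn_reasoning_context
  by_cases hne : messages = []
  · subst hne
    simp [strip_past_turn_reasoning_context, strip_past_turn_reasoning_context_alt]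
  · cases preserve_thinking with
    | true =>
        unfold strip_past_turn_reasoning_context strip_past_turn_reasoning_context_alt
        simp [hne]
    | false =>
        rw [pvA_eq_go messages hne, pvB_eq_go messages hne]
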